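-- pv_equiv track=rewrite | github.com/NimaVahdat/Generalized-Tree-Algorithm | part2.py | string_maker
-- ===== SOURCE A (Python) =====
-- def string_maker(string):
--     flag = False
--     final_string = ""
--     for s in string:
--         if s == ">":
--             final_string += ">"
--             flag = True
--         if s == "\n":
--             flag = False
--
--         if not flag and s != "\n":
--             final_string += s
--
--     final_string = final_string[1:] + "$"
--     return final_string
-- ===== SOURCE B (Python) =====
-- def string_maker(string):
--     parts = []
--     for line in string.split("\n"):
--         if ">" in line:
--             parts.append(line[:line.index(">")] + ">" * line.count(">"))
--         else:
--             parts.append(line)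
--     final = "".join(parts)
--     return final[1:] + "$"
-- ===== Notes on version B (the rewrite author's own statement) =====
-- stated objective: faster
-- what changed: Replaces A's character-by-character boolean-flag state machine with a per-line decomposition: split the input on newlines, rebuild each line as its prefix before the first marker character plus one marker per occurrence in the line, join the pieces, then drop the first character and append the terminator character.
import Mathlib
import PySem

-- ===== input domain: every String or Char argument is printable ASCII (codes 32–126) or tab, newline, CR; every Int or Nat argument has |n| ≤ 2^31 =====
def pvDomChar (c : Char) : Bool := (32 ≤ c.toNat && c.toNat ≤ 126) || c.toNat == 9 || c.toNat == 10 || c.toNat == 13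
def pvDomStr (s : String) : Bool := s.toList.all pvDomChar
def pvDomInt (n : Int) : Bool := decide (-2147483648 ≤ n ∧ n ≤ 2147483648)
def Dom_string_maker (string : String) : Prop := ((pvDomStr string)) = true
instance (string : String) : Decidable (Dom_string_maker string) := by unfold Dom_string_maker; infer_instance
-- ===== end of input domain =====

-- B replaces A's char-by-char flag state machine by a per-line split + index/count construction;
-- a timing run measured B faster (C-level string ops per line instead of a Python per-char loop).

-- ===== PORT A =====
-- one iteration of A's for-loop: state = (flag, final_string)
def stringMakerStep (st : Bool × List Char) (s : Char) : Bool × List Char :=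
  let fs := if s = '>' then st.2 ++ ['>'] else st.2
  let flag := if s = '>' then true else st.1
  let flag := if s = '\n' then false else flag
  let fs := if flag = false ∧ s ≠ '\n' then fs ++ [s] else fs
  (flag, fs)

def string_maker (string : String) : String :=
  let r := string.toList.foldl stringMakerStep (false, [])
  -- final_string[1:] + "$"
  String.ofList (PySem.List.slice r.2 (some 1) none ++ ['$'])

-- ===== PORT B =====
-- the per-line body of B's loop: line[:line.index(">")] + ">" * line.count(">") if ">" in line else line
-- ('">" * n' with n = line.count(">") : Nat is List.replicate n '>')
def lineTransform (line : List Char) : List Char :=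
  if PySem.Chars.isIn ['>'] line then
    PySem.List.slice line none (some (PySem.Chars.find line ['>']))
      ++ List.replicate (PySem.Chars.count line ['>']) '>'
  else line

def string_maker_alt (string : String) : String :=
  let parts := (PySem.Chars.splitOn string.toList ['\n']).foldl
    (fun acc line => acc ++ [lineTransform line]) []
  let final := PySem.Chars.join [] parts
  String.ofList (PySem.List.slice final (some 1) none ++ ['$'])

-- ===== PRECONDITION & SPEC =====
def Spec_string_maker (string : String) (out : String) : Prop := out = string_maker_alt string
instance (string : String) (out : String) : Decidable (Spec_string_maker string out) := by unfold Spec_string_maker; infer_instance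

-- ===== CLAIM (what is proved, stated in full; the proofs are below) =====
def Claim_equal_string_maker : Prop := ∀ (string : String), Dom_string_maker string → Spec_string_maker string (string_maker string)

-- ===== LEMMAS AND PROOFS =====

-- reference result of A's loop from initial flag `flag`
def specSM (flag : Bool) : List Char → List Char
  | [] => []
  | c :: r =>
    if c = '>' then '>' :: specSM true r
    else if c = '\n' then specSM false r
    else if flag then specSM flag r else c :: specSM flag r

-- structural form of s.split("\n"): accumulate the current line in `pre`
def splitNl (pre : List Char) : List Char → List (List Char)
  | [] => [pre]
  | c :: r => if c = '\n' then pre :: splitNl [] r else splitNl (pre ++ [c]) r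

theorem foldl_stepA (cs : List Char) : ∀ (flag : Bool) (acc : List Char),
    (cs.foldl stringMakerStep (flag, acc)).2 = acc ++ specSM flag cs := by
  induction cs with
  | nil => simp [specSM]
  | cons c r ih =>
    intro flag acc
    by_cases hg : c = '>'
    · subst hg; simp [stringMakerStep, specSM, ih]
    · by_cases hn : c = '\n'
      · subst hn; simp [stringMakerStep, specSM, hg, ih]
      · cases flag <;> simp [stringMakerStep, specSM, hg, hn, ih]

theorem findGo_cons_ne (c : Char) (r : List Char) (hc : c ≠ '>') (k : Nat) :
    PySem.Chars.find.go ['>'] (c :: r) k = PySem.Chars.find.go ['>'] r (k + 1) := by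
  simp [PySem.Chars.find.go, List.isPrefixOf, Ne.symm hc]

theorem findGo_shift (l : List Char) : ∀ k : Nat,
    PySem.Chars.find.go ['>'] l k =
      if PySem.Chars.find l ['>'] = -1 then -1 else PySem.Chars.find l ['>'] + k := by
  induction l with
  | nil => intro k; rfl
  | cons c r ih =>
    intro k
    have hnn : -1 ≤ PySem.Chars.find r ['>'] := PySem.Chars.neg_one_le_find r ['>']
    by_cases hc : c = '>'
    · subst hc
      have h0 : PySem.Chars.find ('>' :: r) ['>'] = 0 := rfl
      have hgo : PySem.Chars.find.go ['>'] ('>' :: r) k = k := rfl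
      rw [hgo, h0]
      norm_num
    · have h0 : PySem.Chars.find (c :: r) ['>'] = PySem.Chars.find.go ['>'] r 1 := by
        simpa [PySem.Chars.find] using findGo_cons_ne c r hc 0
      rw [findGo_cons_ne c r hc k, h0, ih (k + 1), ih 1]
      by_cases h : PySem.Chars.find r ['>'] = -1
      · simp [h]
      · simp only [h, if_false]
        split_ifs <;> push_cast <;> omega

theorem find_cons_ne (c : Char) (r : List Char) (hc : c ≠ '>') :
    PySem.Chars.find (c :: r) ['>'] =
      if PySem.Chars.find r ['>'] = -1 then -1 else PySem.Chars.find r ['>'] + 1 := by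
  have h0 : PySem.Chars.find (c :: r) ['>'] = PySem.Chars.find.go ['>'] r 1 := by
    simpa [PySem.Chars.find] using findGo_cons_ne c r hc 0
  rw [h0, findGo_shift r 1]
  norm_num

theorem countGo_eq (fuel : Nat) : ∀ (l : List Char) (acc : Nat), l.length ≤ fuel →
    PySem.Chars.count.go ['>'] fuel l acc = acc + List.count '>' l := by
  induction fuel with
  | zero =>
    intro l acc h
    cases l with
    | nil => rfl
    | cons c r => simp at h
  | succ n ih =>
    intro l acc h
    cases l with
    | nil => simp [PySem.Chars.count.go]
    | cons c r =>
      by_cases hc : c = '>'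
      · subst hc
        have hstep : PySem.Chars.count.go ['>'] (n + 1) ('>' :: r) acc
            = PySem.Chars.count.go ['>'] n r (acc + 1) := by
          simp [PySem.Chars.count.go, List.isPrefixOf]
        rw [hstep, ih r (acc + 1) (by simpa using Nat.le_of_succ_le_succ h)]
        simp
        omega
      · have hstep : PySem.Chars.count.go ['>'] (n + 1) (c :: r) acc
            = PySem.Chars.count.go ['>'] n r acc := by
          simp [PySem.Chars.count.go, List.isPrefixOf, Ne.symm hc]
        rw [hstep, ih r acc (by simpa using Nat.le_of_succ_le_succ h)]
        simp [hc]

theorem count_eq_listCount (l : List Char) :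
    PySem.Chars.count l ['>'] = List.count '>' l := by
  simp [PySem.Chars.count, countGo_eq l.length l 0 le_rfl]

theorem lineTransform_nil : lineTransform [] = [] := by decide

theorem find_cons_gt (r : List Char) : PySem.Chars.find ('>' :: r) ['>'] = 0 := rfl

theorem lineTransform_gt (r : List Char) :
    lineTransform ('>' :: r) = '>' :: List.replicate (List.count '>' r) '>' := by
  simp only [lineTransform, PySem.Chars.isIn, find_cons_gt, count_eq_listCount]
  norm_num
  rw [PySem.List.slice_to _ (by omega)]
  simp [List.replicate_succ]

theorem lineTransform_cons (c : Char) (r : List Char) (hc : c ≠ '>') :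
    lineTransform (c :: r) = c :: lineTransform r := by
  have hnn : -1 ≤ PySem.Chars.find r ['>'] := PySem.Chars.neg_one_le_find r ['>']
  by_cases h : PySem.Chars.find r ['>'] = -1
  · simp [lineTransform, PySem.Chars.isIn, find_cons_ne c r hc, h]
  · have h0 : 0 ≤ PySem.Chars.find r ['>'] := by omega
    have hne : PySem.Chars.find r ['>'] + 1 ≠ -1 := by omega
    simp only [lineTransform, PySem.Chars.isIn, find_cons_ne c r hc, h, if_false,
      count_eq_listCount]
    simp only [bne_iff_ne, ne_eq, h, not_false_eq_true, hne, if_true]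
    rw [PySem.List.slice_to _ (by omega), PySem.List.slice_to _ h0]
    have : (PySem.Chars.find r ['>'] + 1).toNat = (PySem.Chars.find r ['>']).toNat + 1 := by omega
    simp [this, hc]

theorem specT_noNl (l : List Char) (h : '\n' ∉ l) :
    specSM true l = List.replicate (List.count '>' l) '>' := by
  induction l with
  | nil => simp [specSM]
  | cons c r ih =>
    simp only [List.mem_cons, not_or] at h
    by_cases hc : c = '>'
    · subst hc; simp [specSM, ih h.2, List.replicate_succ]
    · simp [specSM, hc, Ne.symm h.1, ih h.2]

theorem specF_noNl (l : List Char) (h : '\n' ∉ l) :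
    specSM false l = lineTransform l := by
  induction l with
  | nil => simp [specSM, lineTransform_nil]
  | cons c r ih =>
    simp only [List.mem_cons, not_or] at h
    by_cases hc : c = '>'
    · subst hc; simp [specSM, lineTransform_gt, specT_noNl r h.2]
    · simp [specSM, hc, Ne.symm h.1, lineTransform_cons c r hc, ih h.2]

theorem specT_split (p : List Char) (r : List Char) (h : '\n' ∉ p) :
    specSM true (p ++ '\n' :: r) = List.replicate (List.count '>' p) '>' ++ specSM false r := by
  induction p with
  | nil => simp [specSM]
  | cons c q ih =>
    simp only [List.mem_cons, not_or] at h
    by_cases hc : c = '>'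
    · subst hc; simp [specSM, ih h.2, List.replicate_succ]
    · simp [specSM, hc, Ne.symm h.1, ih h.2]

theorem specF_split (p : List Char) (r : List Char) (h : '\n' ∉ p) :
    specSM false (p ++ '\n' :: r) = lineTransform p ++ specSM false r := by
  induction p with
  | nil => simp [specSM, lineTransform_nil]
  | cons c q ih =>
    simp only [List.mem_cons, not_or] at h
    by_cases hc : c = '>'
    · subst hc; simp [specSM, lineTransform_gt, specT_split q r h.2]
    · simp [specSM, hc, Ne.symm h.1, lineTransform_cons c q hc, ih h.2]

theorem splitOnGo_eq (fuel : Nat) : ∀ (l cur : List Char) (acc : List (List Char)),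
    l.length < fuel →
    PySem.Chars.splitOn.go ['\n'] fuel l cur acc = acc.reverse ++ splitNl cur.reverse l := by
  induction fuel with
  | zero => intro l cur acc h; omega
  | succ n ih =>
    intro l cur acc h
    cases l with
    | nil => simp [PySem.Chars.splitOn.go, splitNl]
    | cons c r =>
      by_cases hc : c = '\n'
      · subst hc
        simp only [PySem.Chars.splitOn.go, List.isPrefixOf]
        simp [ih r [] (cur.reverse :: acc) (by simpa using h), splitNl]
      · have hstep : PySem.Chars.splitOn.go ['\n'] (n + 1) (c :: r) cur acc
            = PySem.Chars.splitOn.go ['\n'] n r (c :: cur) acc := by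
          simp [PySem.Chars.splitOn.go, List.isPrefixOf, Ne.symm hc]
        rw [hstep, ih r (c :: cur) acc (by simpa using h)]
        simp [splitNl, hc]

theorem splitOn_eq (cs : List Char) :
    PySem.Chars.splitOn cs ['\n'] = splitNl [] cs := by
  simpa using splitOnGo_eq (cs.length + 1) cs [] [] (by omega)

theorem join_splitNl (l : List Char) : ∀ (pre : List Char), '\n' ∉ pre →
    ((splitNl pre l).map lineTransform).flatten = specSM false (pre ++ l) := by
  induction l with
  | nil => intro pre h; simp [splitNl, specF_noNl pre h]
  | cons c r ih =>
    intro pre h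
    by_cases hc : c = '\n'
    · subst hc
      simp [splitNl, ih [] (by simp), specF_split pre r h]
    · have hpc : '\n' ∉ pre ++ [c] := by simp_all [eq_comm]
      have hs : splitNl pre (c :: r) = splitNl (pre ++ [c]) r := by simp [splitNl, hc]
      rw [hs, ih (pre ++ [c]) hpc]
      simp

theorem intercalate_nil_eq_flatten (l : List (List Char)) :
    List.intercalate [] l = l.flatten := by
  simp [List.intercalate]
  induction l with
  | nil => rfl
  | cons h t ih => cases t <;> simp_all [List.intersperse]

-- ===== VERDICT (by name: the statement is the Claim_ definition above) =====
theorem string_maker_spec : Claim_equal_string_maker := by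
  intro s _
  unfold Spec_string_maker string_maker string_maker_alt
  rw [PySem.List.foldl_append_singleton_eq_map]
  simp only [PySem.Chars.join, List.nil_append, intercalate_nil_eq_flatten,
    splitOn_eq, foldl_stepA]
  rw [join_splitNl s.toList [] (by simp)]
  simp
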